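-- pv_equiv track=rewrite | github.com/huggin/gfg | bit/maximize_xor.py | maximize_xor_count
-- ===== SOURCE A (Python) =====
-- def maximize_xor_count(n):
--     # Code here
--     ans = 0
--     k = 1
--     while n:
--         if (n & 1) == 0:
--             ans += k
--         n >>= 1
--         k <<= 1
--     return ans
-- ===== SOURCE B (Python) =====
-- def maximize_xor_count(n):
--     # closed form: set every bit up to and including n's MSB, then xor out n's own bits
--     return ((1 << n.bit_length()) - 1) ^ n
-- ===== Notes on version B (the rewrite author's own statement) =====
-- stated objective: simpler
-- what changed: Replaced the per-bit while-loop accumulating values of zero bits by a single closed-form bit expression ((1 << n.bit_length()) - 1) ^ n.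
import Mathlib
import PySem

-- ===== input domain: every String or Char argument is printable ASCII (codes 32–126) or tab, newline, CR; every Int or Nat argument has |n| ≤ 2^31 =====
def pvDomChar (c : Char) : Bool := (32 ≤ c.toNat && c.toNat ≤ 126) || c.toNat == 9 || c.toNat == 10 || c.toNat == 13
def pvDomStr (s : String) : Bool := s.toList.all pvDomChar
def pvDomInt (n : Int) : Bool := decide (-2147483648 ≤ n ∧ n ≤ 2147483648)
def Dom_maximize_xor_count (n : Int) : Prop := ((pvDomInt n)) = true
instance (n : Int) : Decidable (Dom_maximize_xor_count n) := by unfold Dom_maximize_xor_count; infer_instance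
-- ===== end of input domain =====

-- B replaces A's per-bit while-loop by the closed form ((1 << n.bit_length()) - 1) ^ n (objective: simpler).

-- ===== PORT A =====
-- A's while-loop, recursing on the (nonnegative) loop variable n; on n ≥ 0 (Pre_)
-- this is step-for-step A's loop (on n < 0 Python A never terminates).
def pvLoopA : Nat → Int → Int → Int
  | 0, ans, _ => ans
  | (m+1), ans, k => pvLoopA ((m+1)/2) (if (m+1) % 2 = 0 then ans + k else ans) (k * 2)

def maximize_xor_count (n : Int) : Int := pvLoopA n.toNat 0 1

-- ===== PORT B =====
-- ((1 << n.bit_length()) - 1) ^ n, via PySem's Python-exact bitLength and xor.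
def maximize_xor_count_alt (n : Int) : Int :=
  PySem.Int.bxor ((1 <<< PySem.Int.bitLength n) - 1) n

-- ===== PRECONDITION & SPEC =====
-- Pre_ excludes negative n, on which A's while-loop never terminates (n >>= 1 keeps n = -1).
def Pre_maximize_xor_count (n : Int) : Prop := 0 ≤ n
instance (n : Int) : Decidable (Pre_maximize_xor_count n) := by unfold Pre_maximize_xor_count; infer_instance
def pvWitness_maximize_xor_count : Int := (5)

def Spec_maximize_xor_count (n : Int) (out : Int) : Prop := out = maximize_xor_count_alt n
instance (n : Int) (out : Int) : Decidable (Spec_maximize_xor_count n out) := by unfold Spec_maximize_xor_count; infer_instance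

-- ===== CLAIM (what is proved, stated in full; the proofs are below) =====
def Claim_equal_maximize_xor_count : Prop := ∀ (n : Int), Dom_maximize_xor_count n → Pre_maximize_xor_count n → Spec_maximize_xor_count n (maximize_xor_count n)

-- ===== LEMMAS AND PROOFS =====

-- abbreviation for B's core value on naturals
def pvG (m : Nat) : Nat := ((1 <<< Nat.size m) - 1) ^^^ m

theorem pvG_zero : pvG 0 = 0 := by decide

theorem pvSize_div2_succ (m : Nat) (h : m ≠ 0) : Nat.size m = Nat.size (m / 2) + 1 := by
  conv_lhs => rw [← Nat.bit_bodd_div2 m]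
  rw [Nat.size_bit (by rw [Nat.bit_bodd_div2]; exact h), Nat.div2_val]

theorem pvBitLength_eq_size (m : Nat) : PySem.Int.bitLength (m : Int) = Nat.size m := by
  induction m using Nat.strong_induction_on with
  | _ m ih =>
    match m with
    | 0 => decide
    | (m'+1) =>
      rw [PySem.Int.bitLength_natCast (Nat.succ_pos m'),
        ih ((m'+1)/2) (Nat.div_lt_self (Nat.succ_pos m') (by norm_num)),
        ← pvSize_div2_succ (m'+1) (Nat.succ_ne_zero m')]

theorem pvG_bit (b : Bool) (n : Nat) (h : Nat.bit b n ≠ 0) :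
    pvG (Nat.bit b n) = (!b).toNat + 2 * pvG n := by
  unfold pvG
  rw [Nat.size_bit h, Nat.one_shiftLeft, Nat.one_shiftLeft]
  have h2 : 2 ^ (Nat.size n + 1) - 1 = Nat.bit true (2 ^ Nat.size n - 1) := by
    have : 1 ≤ 2 ^ Nat.size n := Nat.one_le_two_pow
    simp [Nat.bit, Nat.pow_succ]
    omega
  rw [h2, Nat.xor_bit]
  cases b <;> simp [Nat.bit] <;> omega

theorem pvG_rec (m : Nat) (h : m ≠ 0) :
    pvG m = (if m % 2 = 0 then 1 else 0) + 2 * pvG (m / 2) := by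
  have hd := Nat.bit_bodd_div2 m
  have := pvG_bit m.bodd m.div2 (by rw [hd]; exact h)
  rw [hd] at this
  rw [this, Nat.div2_val]
  cases hb : m.bodd <;> simp [Nat.mod_two_of_bodd, hb]

theorem pvLoopA_eq (m : Nat) : ∀ ans k : Int, pvLoopA m ans k = ans + k * (pvG m : Int) := by
  induction m using Nat.strong_induction_on with
  | _ m ih =>
    intro ans k
    match m with
    | 0 => simp [pvLoopA, pvG_zero]
    | (m'+1) =>
      rw [pvLoopA, ih ((m'+1)/2) (Nat.div_lt_self (Nat.succ_pos m') (by norm_num))]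
      rw [pvG_rec (m'+1) (Nat.succ_ne_zero m')]
      by_cases hp : (m'+1) % 2 = 0 <;> simp [hp] <;> ring

-- ===== VERDICT (by name: the statement is the Claim_ definition above) =====
theorem maximize_xor_count_spec : Claim_equal_maximize_xor_count := by
  intro n _ hpre
  unfold Spec_maximize_xor_count maximize_xor_count maximize_xor_count_alt
  obtain ⟨m, rfl⟩ : ∃ m : Nat, n = (m : Int) := ⟨n.toNat, (Int.toNat_of_nonneg hpre).symm⟩
  rw [pvLoopA_eq, pvBitLength_eq_size]
  have hle : 1 ≤ 1 <<< Nat.size m := by rw [Nat.one_shiftLeft]; exact Nat.one_le_two_pow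
  rw [show (1 : Int) = ((1 : Nat) : Int) from rfl, ← Nat.cast_sub hle, PySem.Int.bxor_natCast]
  simp [pvG, Nat.one_shiftLeft]
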